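-- pv_equiv track=rewrite | github.com/mehekj/aoc_2024 | day5/part2.py | sort_update
-- ===== SOURCE A (Python) =====
-- def sort_update(update, rules):
--     nodes = {}
--     for num in update:
--         nodes[num] = []
--
--     for rule in rules:
--         if rule[0] in nodes and rule[1] in nodes:
--             nodes[rule[1]].append(rule[0])
--
--     nodes = sorted(nodes.items(), key=lambda item: len(item[1]))
--
--     return [pair[0] for pair in nodes]
-- ===== SOURCE B (Python) =====
-- def sort_update(update, rules):
--     s = set(update)
--     distinct = list(dict.fromkeys(update))
--
--     def pred_count(num):
--         return sum(1 for r in rules if r[0] in s and r[1] == num)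
--
--     return sorted(distinct, key=pred_count)
-- ===== Notes on version B (the rewrite author's own statement) =====
-- stated objective: simpler
-- what changed: Replaces A's dict of per-node predecessor lists (built by one pass over the rules with appends, then sorting dict items by list length) with a direct per-node predecessor count that scans the rules for each distinct update value, then a stable sort of the deduplicated update by that count.
import Mathlib
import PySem

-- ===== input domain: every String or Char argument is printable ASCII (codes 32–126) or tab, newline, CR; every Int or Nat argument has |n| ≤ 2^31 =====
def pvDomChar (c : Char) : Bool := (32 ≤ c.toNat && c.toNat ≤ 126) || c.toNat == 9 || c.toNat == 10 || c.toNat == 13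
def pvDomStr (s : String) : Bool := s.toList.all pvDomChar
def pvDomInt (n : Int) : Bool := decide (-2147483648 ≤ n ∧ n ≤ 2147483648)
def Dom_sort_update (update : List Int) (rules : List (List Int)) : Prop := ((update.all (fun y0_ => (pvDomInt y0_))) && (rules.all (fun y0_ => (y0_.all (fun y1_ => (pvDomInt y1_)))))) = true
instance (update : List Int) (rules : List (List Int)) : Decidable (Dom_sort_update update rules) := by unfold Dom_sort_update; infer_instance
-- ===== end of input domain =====

-- B replaces A's dict-of-predecessor-lists with a per-node direct count over the rules,
-- sorting the deduplicated update by that count (objective: simpler; not faster).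

-- ===== PORT A =====
-- body of A's 'for rule in rules' loop
def pvStepA (d : PySem.Dict Int (List Int)) (rule : List Int) : PySem.Dict Int (List Int) :=
  match PySem.List.pyGet? rule 0 with
  | none => d  -- rule[0] raises IndexError: excluded by Pre_
  | some r0 =>
    if d.contains r0 then
      match PySem.List.pyGet? rule 1 with
      | none => d  -- rule[1] raises IndexError: excluded by Pre_
      | some r1 =>
        if d.contains r1 then d.modify r1 [] (fun l => l ++ [r0]) else d
    else d

def sort_update (update : List Int) (rules : List (List Int)) : List Int :=
  let nodes : PySem.Dict Int (List Int) :=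
    update.foldl (fun d num => d.insert num []) PySem.Dict.empty
  let nodes := rules.foldl pvStepA nodes
  (PySem.List.sorted nodes.items (fun item => (item.2.length : Int)) false).map (fun pair => pair.1)

-- ===== PORT B =====
-- B's pred_count closure: sum(1 for r in rules if r[0] in s and r[1] == num)
def pvPredCount (s : PySem.Set Int) (rules : List (List Int)) (num : Int) : Int :=
  rules.foldl (fun c r =>
    match PySem.List.pyGet? r 0 with
    | none => c  -- r[0] raises IndexError: excluded by Pre_
    | some r0 =>
      if PySem.Set.contains s r0 then
        match PySem.List.pyGet? r 1 with
        | none => c  -- r[1] raises IndexError: excluded by Pre_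
        | some r1 => if r1 = num then c + 1 else c
      else c) 0

def sort_update_alt (update : List Int) (rules : List (List Int)) : List Int :=
  let s : PySem.Set Int := PySem.Set.ofList update
  let distinct : List Int := PySem.List.dedup update
  PySem.List.sorted distinct (fun num => pvPredCount s rules num) false

-- ===== PRECONDITION & SPEC =====
-- Pre_ excludes exactly the inputs where Python A raises IndexError: some rule is [],
-- or has length 1 with its head in update (then 'rule[1]' is evaluated and raises).
def Pre_sort_update (update : List Int) (rules : List (List Int)) : Prop :=
  ∀ r ∈ rules, r ≠ [] ∧ (r.headI ∈ update → 2 ≤ r.length)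
instance (update : List Int) (rules : List (List Int)) : Decidable (Pre_sort_update update rules) := by unfold Pre_sort_update; infer_instance

def pvWitness_sort_update : List Int × List (List Int) := ([75, 47, 61], [[47, 75], [61, 47]])

def Spec_sort_update (update : List Int) (rules : List (List Int)) (out : List Int) : Prop := out = sort_update_alt update rules
instance (update : List Int) (rules : List (List Int)) (out : List Int) : Decidable (Spec_sort_update update rules out) := by unfold Spec_sort_update; infer_instance

-- ===== CLAIM (what is proved, stated in full; the proofs are below) =====
def Claim_equal_sort_update : Prop := ∀ (update : List Int) (rules : List (List Int)), Dom_sort_update update rules → Pre_sort_update update rules → Spec_sort_update update rules (sort_update update rules)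

-- ===== LEMMAS AND PROOFS =====

-- predecessor list A's dict holds at key k after the rules loop (for k ∈ update)
def pvPreds (S : List Int) (rs : List (List Int)) (k : Int) : List Int :=
  (rs.filter (fun r => decide (r.headI ∈ S) && (r.tail.headI == k))).map (fun r => r.headI)

theorem pvPreds_nil (S : List Int) (k : Int) : pvPreds S [] k = [] := rfl

theorem pvPreds_cons (S : List Int) (r : List Int) (rs : List (List Int)) (k : Int) :
    pvPreds S (r :: rs) k =
      (if r.headI ∈ S ∧ r.tail.headI = k then [r.headI] else []) ++ pvPreds S rs k := by
  by_cases h : r.headI ∈ S ∧ r.tail.headI = k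
  · simp [pvPreds, h.1, h.2]
  · rw [if_neg h]
    simp only [pvPreds, List.filter_cons]
    rw [if_neg]
    · simp
    · simp only [Bool.and_eq_true, decide_eq_true_eq, beq_iff_eq]
      exact h

theorem pv_contains_iff {ν : Type} (d : PySem.Dict Int ν) (k : Int) :
    d.contains k = true ↔ k ∈ d.keys := by
  simp [PySem.Dict.contains, PySem.Dict.keys, List.any_eq_true, List.mem_map, beq_iff_eq]

-- keys of the first loop's dict
theorem pv_keys_first (update : List Int) :
    (update.foldl (fun d num => d.insert num []) (PySem.Dict.empty : PySem.Dict Int (List Int))).keys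
      = PySem.Set.ofList update := by
  rw [PySem.Dict.keys_foldl_insert update (fun _ _ => ([] : List Int)) PySem.Dict.empty]
  simp [PySem.Dict.keys_empty, PySem.Set.update, ← PySem.Set.ofList_eq_foldl]

-- values of the first loop's dict are all []
theorem pv_getD_first (update : List Int) (d : PySem.Dict Int (List Int))
    (h : ∀ k, d.getD k [] = []) (k : Int) :
    (update.foldl (fun d num => d.insert num []) d).getD k [] = [] := by
  induction update generalizing d with
  | nil => exact h k
  | cons a l ih =>
    refine ih (d.insert a []) (fun k' => ?_)
    by_cases hk : k' = a
    · subst hk; exact PySem.Dict.getD_insert_self d k' [] []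
    · rw [PySem.Dict.getD_insert_of_ne d [] [] hk]; exact h k'

-- the rules loop never changes the key list
theorem pv_keys_fold (rs : List (List Int)) (d : PySem.Dict Int (List Int)) :
    (rs.foldl pvStepA d).keys = d.keys := by
  induction rs generalizing d with
  | nil => rfl
  | cons r rs ih =>
    rw [List.foldl_cons, ih]
    unfold pvStepA
    cases PySem.List.pyGet? r 0 with
    | none => rfl
    | some r0 =>
      simp only []
      split
      · cases PySem.List.pyGet? r 1 with
        | none => rfl
        | some r1 =>
          simp only []
          split
          · next hc =>
            rw [PySem.Dict.keys_modify, PySem.Dict.keys_insert_of_contains _ _ hc]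
          · rfl
      · rfl

-- the rules loop appends exactly pvPreds to each key's list
theorem pv_getD_fold (update : List Int) (rs : List (List Int)) (d : PySem.Dict Int (List Int))
    (hkeys : ∀ x, d.contains x = true ↔ x ∈ update)
    (hpre : ∀ r ∈ rs, r ≠ [] ∧ (r.headI ∈ update → 2 ≤ r.length))
    (k : Int) (hk : k ∈ update) :
    (rs.foldl pvStepA d).getD k [] = d.getD k [] ++ pvPreds update rs k := by
  induction rs generalizing d with
  | nil => simp [pvPreds_nil]
  | cons r rs ih =>
    obtain ⟨hne, hlen⟩ := hpre r (by simp)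
    obtain ⟨a, t, rfl⟩ := List.exists_cons_of_ne_nil hne
    rw [List.foldl_cons, pvPreds_cons]
    by_cases hca : a ∈ update
    · have hta : d.contains a = true := (hkeys a).mpr hca
      have h2 : 2 ≤ (a :: t).length := hlen (by simpa using hca)
      obtain ⟨b, t2, rfl⟩ : ∃ b t2, t = b :: t2 := by
        cases t with
        | nil => simp at h2
        | cons b t2 => exact ⟨b, t2, rfl⟩
      by_cases hcbm : b ∈ update
      · have htb : d.contains b = true := (hkeys b).mpr hcbm
        have hstep : pvStepA d (a :: b :: t2) = d.modify b [] (fun l => l ++ [a]) := by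
          simp [pvStepA, pysem, hta, htb]
        rw [hstep]
        have hkeys' : ∀ x, (d.modify b [] (fun l => l ++ [a])).contains x = true ↔ x ∈ update := by
          intro x
          rw [PySem.Dict.contains_modify]
          simp only [Bool.or_eq_true, beq_iff_eq, hkeys x]
          constructor
          · rintro (rfl | hx)
            exacts [hcbm, hx]
          · exact fun hx => Or.inr hx
        rw [ih _ hkeys' (fun r hr => hpre r (by simp [hr]))]
        by_cases hkb : k = b
        · subst hkb
          rw [PySem.Dict.getD_modify_self]
          rw [if_pos (by simp [hca])]
          simp
        · rw [PySem.Dict.getD_modify_of_ne d [] (fun l => l ++ [a]) hkb]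
          rw [if_neg (by simp; intro _ h; exact hkb h.symm)]
          simp
      · have htb : d.contains b = false := by
          rw [← Bool.not_eq_true]
          simp [hkeys b, hcbm]
        have hstep : pvStepA d (a :: b :: t2) = d := by
          simp [pvStepA, pysem, hta, htb]
        rw [hstep, ih d hkeys (fun r hr => hpre r (by simp [hr]))]
        rw [if_neg (by simp; intro _ hbk; exact hcbm (hbk ▸ hk))]
        simp
    · have hta : d.contains a = false := by
        rw [← Bool.not_eq_true]
        simp [hkeys a, hca]
      have hstep : pvStepA d (a :: t) = d := by
        simp [pvStepA, pysem, hta]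
      rw [hstep, ih d hkeys (fun r hr => hpre r (by simp [hr]))]
      rw [if_neg (by simp [hca])]
      simp

-- B's count is the length of A's predecessor list
theorem pv_count_eq (update : List Int) (rs : List (List Int)) (c : Int)
    (hpre : ∀ r ∈ rs, r ≠ [] ∧ (r.headI ∈ update → 2 ≤ r.length)) (num : Int) :
    rs.foldl (fun c r =>
      match PySem.List.pyGet? r 0 with
      | none => c
      | some r0 =>
        if PySem.Set.contains (PySem.Set.ofList update) r0 then
          match PySem.List.pyGet? r 1 with
          | none => c
          | some r1 => if r1 = num then c + 1 else c
        else c) c = c + ((pvPreds update rs num).length : Int) := by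
  induction rs generalizing c with
  | nil => simp [pvPreds_nil]
  | cons r rs ih =>
    obtain ⟨hne, hlen⟩ := hpre r (by simp)
    obtain ⟨a, t, rfl⟩ := List.exists_cons_of_ne_nil hne
    rw [List.foldl_cons, pvPreds_cons]
    have hmem : PySem.Set.contains (PySem.Set.ofList update) a = true ↔ a ∈ update := by
      simp [PySem.Set.contains, PySem.Set.mem_ofList]
    by_cases hca : a ∈ update
    · have h2 : 2 ≤ (a :: t).length := hlen (by simpa using hca)
      obtain ⟨b, t2, rfl⟩ : ∃ b t2, t = b :: t2 := by
        cases t with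
        | nil => simp at h2
        | cons b t2 => exact ⟨b, t2, rfl⟩
      have h01 : PySem.List.pyGet? (a :: b :: t2) 0 = some a := by simp [pysem]
      have h11 : PySem.List.pyGet? (a :: b :: t2) 1 = some b := by simp [pysem]
      have hc : PySem.Set.contains (PySem.Set.ofList update) a = true := hmem.mpr hca
      simp only [h01, h11]
      rw [if_pos hc]
      by_cases hbn : b = num
      · subst hbn
        rw [if_pos rfl, ih (c + 1) (fun r hr => hpre r (by simp [hr]))]
        rw [if_pos (by simp [hca])]
        simp only [List.singleton_append, List.length_cons]
        push_cast
        omega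
      · rw [if_neg hbn, ih c (fun r hr => hpre r (by simp [hr]))]
        rw [if_neg (by simp; intro _ h; exact hbn h)]
        simp
    · have hc : PySem.Set.contains (PySem.Set.ofList update) a = false := by
        rw [← Bool.not_eq_true]
        simp [hca]
      have h01 : PySem.List.pyGet? (a :: t) 0 = some a := by simp [pysem]
      simp only [h01]
      rw [if_neg (by simp [hca])]
      rw [ih c (fun r hr => hpre r (by simp [hr]))]
      rw [if_neg (by simp [hca])]
      simp

theorem pv_insertBy_map {α β : Type} (bf : β → β → Bool) (f : α → β) (x : α) (ys : List α) :
    PySem.List.insertBy bf (f x) (ys.map f)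
      = (PySem.List.insertBy (fun a b => bf (f a) (f b)) x ys).map f := by
  induction ys with
  | nil => rfl
  | cons y ys ih =>
    simp only [List.map_cons, PySem.List.insertBy]
    by_cases h : bf (f x) (f y) = true
    · simp [h]
    · simp [h, ih]

-- a stable sort of a mapped list is the mapped sort under the composed key
theorem pv_sorted_map {α β κ : Type} [LT κ] [DecidableLT κ] (f : α → β) (key : β → κ) (l : List α) :
    PySem.List.sorted (l.map f) key false
      = (PySem.List.sorted l (fun a => key (f a)) false).map f := by
  have aux : ∀ (l : List α) (acc : List α),
      (l.map f).foldl (fun acc x => PySem.List.insertBy (fun a b => decide (key a < key b)) x acc) (acc.map f)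
        = (l.foldl (fun acc x => PySem.List.insertBy (fun a b => decide (key (f a) < key (f b))) x acc) acc).map f := by
    intro l
    induction l with
    | nil => intro acc; rfl
    | cons x l ih =>
      intro acc
      rw [List.map_cons, List.foldl_cons, List.foldl_cons, pv_insertBy_map, ih]
  rw [PySem.List.sorted_eq_foldl_insertBy, PySem.List.sorted_eq_foldl_insertBy]
  simpa using aux l []

-- ===== VERDICT (by name: the statement is the Claim_ definition above) =====
theorem sort_update_spec : Claim_equal_sort_update := by
  unfold Claim_equal_sort_update
  intro update rules _ hpre
  unfold Spec_sort_update sort_update sort_update_alt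
  simp only []
  -- characterise A's dict after both loops
  have hD1keys : ∀ x, ((update.foldl (fun d num => d.insert num []) (PySem.Dict.empty : PySem.Dict Int (List Int))).contains x = true) ↔ x ∈ update := by
    intro x
    rw [pv_contains_iff, pv_keys_first, PySem.Set.mem_ofList]
  have hkeys : (rules.foldl pvStepA (update.foldl (fun d num => d.insert num []) PySem.Dict.empty)).keys = PySem.Set.ofList update := by
    rw [pv_keys_fold, pv_keys_first]
  have hitems : (rules.foldl pvStepA (update.foldl (fun d num => d.insert num []) PySem.Dict.empty)).items
      = (PySem.Set.ofList update).map (fun k => (k, pvPreds update rules k)) := by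
    rw [PySem.Dict.items_eq_map_keys _ (hkeys ▸ PySem.Set.nodup_ofList update) [], hkeys]
    refine List.map_congr_left (fun k hkK => ?_)
    have hk : k ∈ update := (PySem.Set.mem_ofList update k).mp hkK
    rw [pv_getD_fold update rules _ hD1keys hpre k hk,
      pv_getD_first update PySem.Dict.empty (fun k' => by simp [pysem]) k]
    simp
  rw [hitems, pv_sorted_map (fun k => (k, pvPreds update rules k)) (fun item => (item.2.length : Int)) (PySem.Set.ofList update)]
  rw [List.map_map]
  have hkeyB : (fun num => pvPredCount (PySem.Set.ofList update) rules num)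
      = (fun k => ((pvPreds update rules k).length : Int)) := by
    funext num
    unfold pvPredCount
    rw [pv_count_eq update rules 0 hpre num]
    simp
  rw [PySem.List.dedup_eq_ofList, hkeyB]
  simp [Function.comp_def]
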